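-- pv_equiv track=rewrite | github.com/IntSPstudio/it8c | library/data.py | cdb114391
-- ===== SOURCE A (Python) =====
-- def cbd325306(array_height,array_width,array_content):
-- 	return [[array_content for xp in range(array_width)] for yp in range(array_height)]
--
-- def cdb114391(array1_content, array2_content):
-- 	array1_height = len(array1_content)
-- 	array1_width = len(array1_content[0])
-- 	array2Length = len(array2_content)
-- 	array3_height = array1_height
-- 	array3_width = array1_width +1
-- 	if array2Length > array1_height:
-- 		array3_height = array2Length
-- 	array3_content = cbd325306(array3_height, array3_width, "")
-- 	for y in range(0, array1_height):
-- 		for x in range(0, array1_width):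
-- 			array3_content[y][x] = array1_content[y][x]
-- 	for i in range(0, array2Length):
-- 		array3_content[i][array3_width -1] = array2_content[i]
-- 	return array3_content
-- ===== SOURCE B (Python) =====
-- def cdb114391(array1_content, array2_content):
--     w1 = len(array1_content[0])
--     height = max(len(array1_content), len(array2_content))
--
--     def pad(col):
--         return col + [""] * (height - len(col))
--
--     cols = [pad([row[x] for row in array1_content]) for x in range(w1)]
--     cols.append(pad(list(array2_content)))
--     return [list(r) for r in zip(*cols)]
-- ===== Notes on version B (the rewrite author's own statement) =====
-- stated objective: alternative
-- what changed: B constructs the result column-major: it extracts and pads each column of array1, appends array2 as one more padded column, and transposes with zip(*cols); A preallocates a blank row-major grid and overwrites it in two index-loop passes.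
-- outside the precondition, e.g. on cdb114391([], ['x']): A raises IndexError, B raises IndexError; on cdb114391([['a', 'b'], ['c']], []): A raises IndexError, B raises IndexError
import Mathlib
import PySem

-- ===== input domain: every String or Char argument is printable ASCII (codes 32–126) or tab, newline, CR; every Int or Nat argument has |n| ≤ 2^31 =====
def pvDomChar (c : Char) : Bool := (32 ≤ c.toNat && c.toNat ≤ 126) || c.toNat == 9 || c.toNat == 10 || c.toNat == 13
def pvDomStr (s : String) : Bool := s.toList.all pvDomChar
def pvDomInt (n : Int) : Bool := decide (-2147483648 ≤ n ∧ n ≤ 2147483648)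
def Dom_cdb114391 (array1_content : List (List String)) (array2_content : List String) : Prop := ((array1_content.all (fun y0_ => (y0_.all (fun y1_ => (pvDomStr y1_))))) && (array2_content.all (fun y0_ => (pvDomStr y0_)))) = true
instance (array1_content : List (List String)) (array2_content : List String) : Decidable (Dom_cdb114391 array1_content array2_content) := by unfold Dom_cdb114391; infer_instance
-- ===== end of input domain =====

-- ===== PORT A =====
-- B builds the result column-major (pad each column, append array2 as a column, transpose);
-- A preallocates a blank row-major grid and overwrites it in two index-loop passes. Same return value.
-- helper: Python cbd325306 (blank grid)
def cbd325306 (array_height array_width : Nat) (array_content : String) : List (List String) :=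
  (List.range array_height).map (fun _ => (List.range array_width).map (fun _ => array_content))

-- cell reads a1[y][x] / a2[i]; in range under Pre_ (Python raises IndexError outside, excluded by Pre_)
def cdb114391 (array1_content : List (List String)) (array2_content : List String) : List (List String) :=
  let array1_height := array1_content.length
  let array1_width := (array1_content.headD []).length
  let array2Length := array2_content.length
  let array3_height := if array2Length > array1_height then array2Length else array1_height
  let array3_width := array1_width + 1
  let g0 := cbd325306 array3_height array3_width ""
  let g1 := (List.range array1_height).foldl
      (fun g y => (List.range array1_width).foldl
        (fun g x => g.modify y (fun row => row.set x ((array1_content.getD y []).getD x ""))) g) g0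
  (List.range array2Length).foldl
      (fun g i => g.modify i (fun row => row.set (array3_width - 1) (array2_content.getD i ""))) g1

-- ===== PORT B =====
-- transliteration of Source B: pad each column of array1 to `height`, append array2 as one more
-- padded column, then transpose; zip(*cols) over equal-length columns is the j-th-of-each map.
def cdb114391_alt (array1_content : List (List String)) (array2_content : List String) : List (List String) :=
  let w1 := (array1_content.headD []).length
  let height := max array1_content.length array2_content.length
  let pad := fun (col : List String) => col ++ List.replicate (height - col.length) ""
  let cols := ((List.range w1).map (fun x => pad (array1_content.map (fun row => row.getD x "")))) ++ [pad array2_content]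
  (List.range height).map (fun j => cols.map (fun col => col.getD j ""))

-- ===== PRECONDITION & SPEC =====
-- Pre_ excludes exactly the inputs on which Python A raises IndexError: an empty array1_content
-- (A reads array1_content[0]) and ragged grids with a row shorter than row 0 (A reads
-- array1_content[y][x] for all x < len(array1_content[0])). B raises there too.
def Pre_cdb114391 (array1_content : List (List String)) (array2_content : List String) : Prop :=
  array1_content ≠ [] ∧
    ∀ row ∈ array1_content, (array1_content.headD []).length ≤ row.length
instance (array1_content : List (List String)) (array2_content : List String) :
    Decidable (Pre_cdb114391 array1_content array2_content) := by unfold Pre_cdb114391; infer_instance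
def pvWitness_cdb114391 : List (List String) × List String := ([["a", "b"], ["c", "d"]], ["x", "y", "z"])

def Spec_cdb114391 (array1_content : List (List String)) (array2_content : List String) (out : List (List String)) : Prop := out = cdb114391_alt array1_content array2_content
instance (array1_content : List (List String)) (array2_content : List String) (out : List (List String)) : Decidable (Spec_cdb114391 array1_content array2_content out) := by unfold Spec_cdb114391; infer_instance

-- ===== CLAIM (what is proved, stated in full; the proofs are below) =====
def Claim_equal_cdb114391 : Prop := ∀ (array1_content : List (List String)) (array2_content : List String), Dom_cdb114391 array1_content array2_content → Pre_cdb114391 array1_content array2_content → Spec_cdb114391 array1_content array2_content (cdb114391 array1_content array2_content)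

-- ===== LEMMAS AND PROOFS =====

lemma modify_modify_same {A : Type} (g : List A) (y : Nat) (f f' : A → A) :
    (g.modify y f).modify y f' = g.modify y (fun a => f' (f a)) := by
  apply List.ext_getElem?
  intro j
  simp only [List.getElem?_modify]
  cases g[j]? <;> simp <;> split <;> simp

lemma foldl_modify_fixed {A B : Type} (xs : List B) (y : Nat) (step : B → A → A) (g : List A) :
    xs.foldl (fun g x => g.modify y (step x)) g
      = g.modify y (fun a => xs.foldl (fun a x => step x a) a) := by
  induction xs generalizing g with
  | nil =>
    simp [List.foldl]
    apply List.ext_getElem?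
    intro j
    simp only [List.getElem?_modify]
    cases g[j]? <;> simp
  | cons x xs ih =>
    simp only [List.foldl]
    rw [ih, modify_modify_same]

lemma rowfold_length (n : Nat) (v : Nat → String) (row : List String) :
    ((List.range n).foldl (fun r x => r.set x (v x)) row).length = row.length := by
  induction n with
  | zero => simp
  | succ n ih => simp [List.range_succ, List.foldl_append, ih]

lemma rowfold_getElem? (n : Nat) (v : Nat → String) (row : List String) (j : Nat) :
    ((List.range n).foldl (fun r x => r.set x (v x)) row)[j]?
      = if j < n ∧ j < row.length then some (v j) else row[j]? := by
  induction n with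
  | zero => simp
  | succ n ih =>
    rw [List.range_succ, List.foldl_append]
    simp only [List.foldl]
    rw [List.getElem?_set, rowfold_length, ih]
    by_cases h : n = j
    · subst h
      simp only [Nat.lt_irrefl, false_and, if_false]
      by_cases hr : n < row.length
      · simp [hr]
      · simp [hr]
    · have hiff : j < n + 1 ↔ j < n := by omega
      simp [h, hiff]

lemma gridfold_getElem? (m : Nat) (F : Nat → List String → List String)
    (g : List (List String)) (j : Nat) :
    ((List.range m).foldl (fun g y => g.modify y (F y)) g)[j]?
      = if j < m then (F j) <$> g[j]? else g[j]? := by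
  induction m with
  | zero => simp
  | succ m ih =>
    rw [List.range_succ, List.foldl_append]
    simp only [List.foldl]
    rw [List.getElem?_modify, ih]
    by_cases h : m = j
    · subst h
      simp
    · have hiff : j < m + 1 ↔ j < m := by omega
      simp only [hiff]
      by_cases hjm : j < m <;> cases g[j]? <;> simp [h, hjm]

lemma pad_getD (m : Nat) (col : List String) (j : Nat) :
    (col ++ List.replicate m "").getD j ""
      = if j < col.length then col.getD j "" else "" := by
  simp only [List.getD, List.getElem?_append, List.getElem?_replicate]
  by_cases h : j < col.length
  · simp [h]
  · simp only [h, if_neg, not_false_iff]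
    split <;> simp

-- ===== VERDICT (by name: the statement is the Claim_ definition above) =====
theorem cdb114391_spec : Claim_equal_cdb114391 := by
  unfold Claim_equal_cdb114391
  intro a1 a2 _ _
  unfold Spec_cdb114391 cdb114391 cdb114391_alt cbd325306
  simp only [Nat.add_sub_cancel, foldl_modify_fixed]
  apply List.ext_getElem?
  intro j
  rw [gridfold_getElem?, gridfold_getElem?]
  have hmax : (if a2.length > a1.length then a2.length else a1.length) = max a1.length a2.length := by
    split <;> omega
  rw [hmax]
  simp only [List.getElem?_map]
  set h1 := a1.length
  set w1 := (a1.headD []).length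
  set h2 := a2.length
  set height := max h1 h2 with hheight
  have hrg : (List.range height)[j]? = if j < height then some j else none := by
    by_cases h : j < height <;> simp [h]
  rw [hrg]
  by_cases hj : j < height
  case neg => simp [hj]
  simp only [hj, if_pos, Option.map_some]
  by_cases hj1 : j < h1 <;> by_cases hj2 : j < h2 <;>
      simp only [hj1, hj2, if_pos, if_neg, not_false_iff] <;>
    [skip; skip; skip; omega] <;>
  · simp only [Option.map_eq_map, Option.map_some, Option.some.injEq]
    apply List.ext_getElem?
    intro k
    simp only [List.getElem?_set, rowfold_getElem?, rowfold_length, List.getElem?_map,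
      List.getElem?_append, List.length_map, List.length_range]
    by_cases hk : k < w1
    · -- column k of array1
      have hkw : ¬ (w1 = k) := by omega
      have hk1 : k < w1 + 1 := by omega
      have hrk : (List.range w1)[k]? = some k := by simp [hk]
      have hrk1 : (List.range (w1 + 1))[k]? = some k := by simp [hk1]
      simp only [hk, hk1, hkw, true_and, if_pos, if_neg, not_false_iff, hrk, hrk1,
        Option.map_some]
      rw [pad_getD]
      simp only [List.length_map]
      by_cases hjh : j < h1
      · have hja : j < a1.length := hjh
        obtain ⟨r, hr⟩ : ∃ r, a1[j]? = some r := ⟨_, List.getElem?_eq_getElem hjh⟩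
        simp [hja, List.getD, List.getElem?_map, hr]
        all_goals exact absurd hjh hj1
      · have hja : ¬ j < a1.length := hjh
        have hnone : a1[j]? = none := by simp_all
        simp [hja, List.getD, List.getElem?_map, hnone]
    · by_cases hk2 : k = w1
      · -- the appended column from array2
        subst hk2
        have hrk : (List.range w1)[w1]? = none := by simp
        have hrw : (List.range (w1 + 1))[w1]? = some w1 := by simp
        simp only [Nat.lt_irrefl, false_and, if_false, Nat.lt_succ_self, true_and, if_pos,
          hrk, hrw, Option.map_none, Option.map_some, Nat.sub_self,
          List.getElem?_cons_zero]
        rw [pad_getD]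
        simp only [List.getD]
        by_cases hjh : j < h2
        · have hja : j < a2.length := hjh
          obtain ⟨r, hr⟩ : ∃ r, a2[j]? = some r := ⟨_, List.getElem?_eq_getElem hjh⟩
          simp [hja, hr]
          all_goals exact absurd hjh hj2
        · have hja : ¬ j < a2.length := hjh
          have hnone : a2[j]? = none := by simp_all
          simp [hja, hnone]
      · -- past the last column: both none
        have h3 : ¬ (k < w1 + 1) := by omega
        have h4 : (List.range w1)[k]? = none := by simp; omega
        have h5 : ¬ (k - w1 < 1) := by omega
        have h6 : ¬ (w1 = k) := by omega
        simp [hk, h3, h4, h5, h6]
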